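-- pv_equiv track=rewrite | github.com/Ali-thepro/dcu | ca268/lab-1/q2.py | move_vow
-- ===== SOURCE A (Python) =====
-- def move_vow(line):
--
--     vowels = 'aeiouAEIOU'
--     a = []
--     for ch in line:
--         if ch in vowels:
--             a.append(ch)
--
--     for ch in line:
--         if ch not in vowels:
--             a.append(ch)
--     return ''.join(a)
-- ===== SOURCE B (Python) =====
-- def move_vow(line):
--     vowels = 'aeiouAEIOU'
--     return ''.join(sorted(line, key=lambda ch: ch not in vowels))
-- ===== Notes on version B (the rewrite author's own statement) =====
-- stated objective: idiomatic
-- what changed: Replaced the two explicit filtering passes with a single stable sort keyed on non-vowelhood, so vowels (key False) come first in original order followed by the rest.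
import Mathlib
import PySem

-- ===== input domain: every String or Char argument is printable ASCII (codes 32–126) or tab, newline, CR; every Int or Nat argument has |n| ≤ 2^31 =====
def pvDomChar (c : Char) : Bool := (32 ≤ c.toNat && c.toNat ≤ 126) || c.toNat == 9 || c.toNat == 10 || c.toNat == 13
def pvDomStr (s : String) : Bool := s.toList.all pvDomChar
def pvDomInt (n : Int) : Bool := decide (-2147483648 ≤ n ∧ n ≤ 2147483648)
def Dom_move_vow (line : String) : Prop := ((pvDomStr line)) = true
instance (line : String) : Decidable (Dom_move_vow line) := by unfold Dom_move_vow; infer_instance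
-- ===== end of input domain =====

-- B replaces A's two filtering passes by one stable sort keyed on non-vowelhood (idiomatic; not faster).

-- ===== PORT A =====
def move_vow (line : String) : String :=
  let vowels := "aeiouAEIOU".toList
  let a := line.toList.foldl (fun a ch => if vowels.contains ch then a ++ [ch] else a) []
  let a := line.toList.foldl (fun a ch => if !(vowels.contains ch) then a ++ [ch] else a) a
  String.mk a

-- ===== PORT B =====
def move_vow_alt (line : String) : String :=
  let vowels := "aeiouAEIOU".toList
  String.mk (PySem.List.sorted line.toList (fun ch => !(vowels.contains ch)))

-- ===== PRECONDITION & SPEC =====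
def Spec_move_vow (line : String) (out : String) : Prop := out = move_vow_alt line
instance (line : String) (out : String) : Decidable (Spec_move_vow line out) := by unfold Spec_move_vow; infer_instance

-- ===== CLAIM (what is proved, stated in full; the proofs are below) =====
def Claim_equal_move_vow : Prop := ∀ (line : String), Dom_move_vow line → Spec_move_vow line (move_vow line)

-- ===== LEMMAS AND PROOFS =====

-- inserting an element with key `false` (a vowel) lands right after the false-key prefix
theorem insertBy_vowel (p : Char → Bool) (x : Char) (hx : p x = true) :
    ∀ (V W : List Char), (∀ v ∈ V, p v = true) → (∀ w ∈ W, p w = false) →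
      PySem.List.insertBy (fun a b => decide ((!p a) < (!p b))) x (V ++ W) = V ++ x :: W := by
  intro V
  induction V with
  | nil =>
    intro W _ hW
    cases W with
    | nil => simp [PySem.List.insertBy]
    | cons w W' =>
      have hw : p w = false := hW w (by simp)
      simp [PySem.List.insertBy, hx, hw]
  | cons v V' ih =>
    intro W hV hW
    have hv : p v = true := hV v (by simp)
    have : PySem.List.insertBy (fun a b => decide ((!p a) < (!p b))) x (V' ++ W) = V' ++ x :: W :=
      ih W (fun u hu => hV u (by simp [hu])) hW
    simp [PySem.List.insertBy, hv, hx, this]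

theorem foldl_insertBy_partition (p : Char → Bool) :
    ∀ (xs V W : List Char), (∀ v ∈ V, p v = true) → (∀ w ∈ W, p w = false) →
      xs.foldl (fun acc x =>
          PySem.List.insertBy (fun a b => decide ((!p a) < (!p b))) x acc) (V ++ W)
        = (V ++ xs.filter p) ++ (W ++ xs.filter (fun x => !p x)) := by
  intro xs
  induction xs with
  | nil => intro V W _ _; simp
  | cons x xs ih =>
    intro V W hV hW
    by_cases hx : p x = true
    · have hins := insertBy_vowel p x hx V W hV hW
      have step : (x :: xs).foldl (fun acc x =>
            PySem.List.insertBy (fun a b => decide ((!p a) < (!p b))) x acc) (V ++ W)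
          = xs.foldl (fun acc x =>
            PySem.List.insertBy (fun a b => decide ((!p a) < (!p b))) x acc) ((V ++ [x]) ++ W) := by
        simp [List.foldl_cons, hins]
      rw [step, ih (V ++ [x]) W (by intro v hv; rcases List.mem_append.1 hv with h | h
                                    · exact hV v h
                                    · simp at h; simpa [h] using hx) hW]
      simp [hx]
    · have hx' : p x = false := by simpa using hx
      have hins : PySem.List.insertBy (fun a b => decide ((!p a) < (!p b))) x (V ++ W)
          = (V ++ W) ++ [x] := by
        apply PySem.List.insertBy_of_forall_not_before
        intro y _
        simp [hx', Bool.lt_iff]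
      have step : (x :: xs).foldl (fun acc x =>
            PySem.List.insertBy (fun a b => decide ((!p a) < (!p b))) x acc) (V ++ W)
          = xs.foldl (fun acc x =>
            PySem.List.insertBy (fun a b => decide ((!p a) < (!p b))) x acc) (V ++ (W ++ [x])) := by
        simp [List.foldl_cons, hins]
      rw [step, ih V (W ++ [x]) hV (by intro w hw; rcases List.mem_append.1 hw with h | h
                                       · exact hW w h
                                       · simp at h; simpa [h] using hx')]
      simp [hx']

theorem sorted_key_partition (p : Char → Bool) (xs : List Char) :
    PySem.List.sorted xs (fun ch => !(p ch))
      = xs.filter p ++ xs.filter (fun x => !p x) := by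
  rw [PySem.List.sorted_eq_foldl_insertBy]
  simpa using foldl_insertBy_partition p xs [] [] (by simp) (by simp)

-- ===== VERDICT (by name: the statement is the Claim_ definition above) =====
theorem move_vow_spec : Claim_equal_move_vow := by
  intro line _
  unfold Spec_move_vow move_vow move_vow_alt
  dsimp only
  rw [sorted_key_partition (fun ch => "aeiouAEIOU".toList.contains ch) line.toList]
  rw [PySem.List.foldl_append_if (fun ch => "aeiouAEIOU".toList.contains ch) (fun ch => ch),
      PySem.List.foldl_append_if (fun ch => !("aeiouAEIOU".toList.contains ch)) (fun ch => ch)]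
  simp
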